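-- pv_equiv track=rewrite | github.com/Komal97/GeekForGeeks-Problems | Graph/hamiltonian_cycle.py | is_path_hamiltonian
-- ===== SOURCE A (Python) =====
-- def is_path_hamiltonian(graph, visited, src, count, v):
--     if count == v:
--         return True
--
--     visited[src] = True
--     for neighbour in graph[src]:
--         if not visited[neighbour]:
--             path_found = is_path_hamiltonian(graph, visited, neighbour, count+1, v)
--             if path_found:
--                 return True
--     visited[src] = False
--
--     return False
-- ===== SOURCE B (Python) =====
-- def is_path_hamiltonian(graph, visited, src, count, v):
--     # Return-value equivalent to A on the natural domain; purely functional: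
--     # `visited` is read-only and the current path is carried as an immutable tuple
--     # (A instead marks/unmarks entries of `visited` in place).
--     def dfs(node, count, path):
--         if count == v:
--             return True
--         path = path + (node,)
--         return any(not visited[n] and n not in path and dfs(n, count + 1, path)
--                    for n in graph[node])
--     return dfs(src, count, ())
-- ===== Notes on version B (the rewrite author's own statement) =====
-- stated objective: alternative
-- what changed: The in-place mark/unmark backtracking over a shared visited array is replaced by a purely functional DFS that keeps visited read-only and threads the current path as an immutable tuple, testing 'not visited[n] and n not in path' with an any-over-generator instead of a for loop with mutation and restoration.
-- outside the precondition, e.g. on is_path_hamiltonian([[-1]], [False], 0, 0, 1): A returns False, B returns True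
import Mathlib
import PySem

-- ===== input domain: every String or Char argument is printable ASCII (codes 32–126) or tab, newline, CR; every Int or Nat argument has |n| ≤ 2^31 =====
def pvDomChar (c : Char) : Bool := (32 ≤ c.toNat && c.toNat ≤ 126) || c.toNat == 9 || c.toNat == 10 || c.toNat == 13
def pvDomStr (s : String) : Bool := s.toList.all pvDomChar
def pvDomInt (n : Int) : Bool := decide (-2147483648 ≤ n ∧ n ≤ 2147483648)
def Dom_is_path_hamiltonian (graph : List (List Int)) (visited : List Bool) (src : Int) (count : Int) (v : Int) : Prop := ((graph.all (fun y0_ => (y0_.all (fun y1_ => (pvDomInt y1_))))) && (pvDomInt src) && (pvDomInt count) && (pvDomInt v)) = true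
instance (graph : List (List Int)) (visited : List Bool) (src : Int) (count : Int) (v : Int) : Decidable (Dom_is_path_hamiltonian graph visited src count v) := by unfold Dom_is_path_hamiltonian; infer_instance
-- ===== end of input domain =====

-- B replaces A's in-place mark/unmark backtracking by a purely functional DFS carrying the
-- current path (objective: alternative decomposition, same asymptotic cost).  A mutates the
-- caller's `visited` list (restored on failure, path left marked on success); B does not
-- mutate it: only RETURN-value equivalence is claimed here.

-- ===== PORT A =====
-- the `for neighbour in graph[src]` loop of A, threading the mutated visited list;
-- `recur` is the recursive call at one less fuel
def pvLoopA (recur : List Bool → Int → Bool × List Bool) (src : Int) :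
    List Int → List Bool → Bool × List Bool
  | [], vis => (false, PySem.List.pySetD vis src false)      -- visited[src] = False; return False
  | n :: ns, vis =>
    if PySem.List.pyGetD vis n false = false then            -- if not visited[neighbour]
      match recur vis n with
      | (true, vis') => (true, vis')                         -- if path_found: return True
      | (false, vis') => pvLoopA recur src ns vis'
    else pvLoopA recur src ns vis

-- A's recursion, fuelled (fuel only makes the recursion total; visited.length + 2 always suffices)
def pvAuxA (graph : List (List Int)) (v : Int) :
    Nat → List Bool → Int → Int → Bool × List Bool
  | 0, vis, _, _ => (false, vis)
  | fuel+1, vis, src, count =>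
    if count = v then (true, vis)
    else
      pvLoopA (fun vis' n => pvAuxA graph v fuel vis' n (count + 1)) src
        (PySem.List.pyGetD graph src [])                     -- graph[src]
        (PySem.List.pySetD vis src true)                     -- visited[src] = True

def is_path_hamiltonian (graph : List (List Int)) (visited : List Bool) (src : Int) (count : Int) (v : Int) : Bool :=
  (pvAuxA graph v (visited.length + 2) visited src count).1

-- ===== PORT B =====
-- B's pure DFS: visited is read-only, the current path is the extra list argument
def pvDfsB (graph : List (List Int)) (visited : List Bool) (v : Int) :
    Nat → Int → Int → List Int → Bool
  | 0, _, _, _ => false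
  | fuel+1, node, count, path =>
    if count = v then true
    else
      let path' := path ++ [node]
      (PySem.List.pyGetD graph node []).any (fun n =>
        !(PySem.List.pyGetD visited n false) && !(path'.contains n) &&
          pvDfsB graph visited v fuel n (count + 1) path')

def is_path_hamiltonian_alt (graph : List (List Int)) (visited : List Bool) (src : Int) (count : Int) (v : Int) : Bool :=
  pvDfsB graph visited v (visited.length + 2) src count []

-- ===== PRECONDITION & SPEC =====
-- Pre_ restricts to the natural adjacency-list domain: unless the count == v base case fires
-- immediately, src and every listed neighbour must be genuine node indices (0 ≤ n < len(graph)
-- = len(visited)).  Outside it A either raises IndexError or relies on Python's negative-index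
-- wraparound reading A's own in-place marks, which the non-mutating B does not reproduce.
def Pre_is_path_hamiltonian (graph : List (List Int)) (visited : List Bool) (src : Int) (count : Int) (v : Int) : Prop :=
  count = v ∨
    (0 ≤ src ∧ src.toNat < graph.length ∧ graph.length = visited.length ∧
      ∀ row ∈ graph, ∀ n ∈ row, 0 ≤ n ∧ n.toNat < graph.length)
instance (graph : List (List Int)) (visited : List Bool) (src : Int) (count : Int) (v : Int) : Decidable (Pre_is_path_hamiltonian graph visited src count v) := by unfold Pre_is_path_hamiltonian; infer_instance

def pvWitness_is_path_hamiltonian : List (List Int) × List Bool × Int × Int × Int :=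
  ([[1], [0]], [false, false], 0, 0, 2)

def Spec_is_path_hamiltonian (graph : List (List Int)) (visited : List Bool) (src : Int) (count : Int) (v : Int) (out : Bool) : Prop := out = is_path_hamiltonian_alt graph visited src count v
instance (graph : List (List Int)) (visited : List Bool) (src : Int) (count : Int) (v : Int) (out : Bool) : Decidable (Spec_is_path_hamiltonian graph visited src count v out) := by unfold Spec_is_path_hamiltonian; infer_instance

-- ===== CLAIM (what is proved, stated in full; the proofs are below) =====
def Claim_equal_is_path_hamiltonian : Prop := ∀ (graph : List (List Int)) (visited : List Bool) (src : Int) (count : Int) (v : Int), Dom_is_path_hamiltonian graph visited src count v → Pre_is_path_hamiltonian graph visited src count v → Spec_is_path_hamiltonian graph visited src count v (is_path_hamiltonian graph visited src count v)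

-- ===== LEMMAS AND PROOFS =====

-- abbreviation used only by the proofs: a Python boolean read visited[i]
def pvGetB (vis : List Bool) (i : Int) : Bool := PySem.List.pyGetD vis i false

-- the simulation invariant: A's current visited list agrees with "B's frozen visited ∪ path"
def pvInv (visited0 vis : List Bool) (gl : Nat) (path : List Int) : Prop :=
  vis.length = visited0.length ∧
  ∀ i : Int, 0 ≤ i → i.toNat < gl → pvGetB vis i = (pvGetB visited0 i || path.contains i)

theorem pvSet_restore (vis : List Bool) (src : Int) (h0 : 0 ≤ src)
    (hl : src.toNat < vis.length) (hf : pvGetB vis src = false) :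
    PySem.List.pySetD (PySem.List.pySetD vis src true) src false = vis := by
  rw [PySem.List.pySetD_of_nonneg _ _ h0, PySem.List.pySetD_of_nonneg _ _ h0,
    List.set_set]
  have hv : vis[src.toNat] = false := by
    have hg := PySem.List.pyGetD_eq_getElem vis false h0 (by omega)
    rw [pvGetB, hg] at hf; exact hf
  rw [show (false : Bool) = vis[src.toNat] from hv.symm]
  exact List.set_getElem_self hl

theorem pvLoopA_spec (recur : List Bool → Int → Bool × List Bool) (dfs : Int → Bool)
    (visited0 : List Bool) (gl : Nat) (path' : List Int) (src : Int)
    (hrec : ∀ vis n, 0 ≤ n → n.toNat < gl → pvInv visited0 vis gl path' →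
      ((recur vis n).1 = dfs n ∧
        (pvGetB vis n = false → (recur vis n).1 = false → (recur vis n).2 = vis))) :
    ∀ row : List Int, (∀ n ∈ row, 0 ≤ n ∧ n.toNat < gl) →
      ∀ vis, pvInv visited0 vis gl path' →
        ((pvLoopA recur src row vis).1
            = row.any (fun n => !(pvGetB visited0 n) && !(path'.contains n) && dfs n)
          ∧ ((pvLoopA recur src row vis).1 = false →
              (pvLoopA recur src row vis).2 = PySem.List.pySetD vis src false)) := by
  intro row
  induction row with
  | nil => intro _ vis _; exact ⟨rfl, fun _ => rfl⟩
  | cons n ns ih =>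
    intro hrow vis hinv
    have hn := hrow n (List.mem_cons_self ..)
    have hns : ∀ m ∈ ns, 0 ≤ m ∧ m.toNat < gl := fun m hm => hrow m (List.mem_cons_of_mem _ hm)
    have hguard : pvGetB vis n = (pvGetB visited0 n || path'.contains n) :=
      hinv.2 n hn.1 hn.2
    rw [pvLoopA]
    by_cases hg : PySem.List.pyGetD vis n false = false
    · -- A recurses on this unvisited neighbour
      rw [if_pos hg]
      have hg' : pvGetB vis n = false := hg
      rw [hg'] at hguard
      rcases Bool.or_eq_false_iff.mp hguard.symm with ⟨h1, h2⟩
      have hr := hrec vis n hn.1 hn.2 hinv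
      rcases hrc : recur vis n with ⟨b, vis'⟩
      rw [hrc] at hr
      have hd : dfs n = b := hr.1.symm
      have h2' : n ∉ path' := by simpa using h2
      cases b with
      | true =>
        refine ⟨?_, fun h => absurd h (by simp)⟩
        simp [List.any_cons, h1, h2', hd]
      | false =>
        have hres : vis' = vis := hr.2 hg' rfl
        rw [hres]
        have hih := ih hns vis hinv
        refine ⟨?_, hih.2⟩
        simp [List.any_cons, h1, h2', hd, hih.1]
    · -- neighbour already marked: both sides skip it
      rw [if_neg hg]
      have hgt : pvGetB vis n = true := by
        cases hv : pvGetB vis n with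
        | false => exact absurd hv hg
        | true => rfl
      rw [hgt] at hguard
      have hih := ih hns vis hinv
      refine ⟨?_, hih.2⟩
      cases h1 : pvGetB visited0 n with
      | true => simp [List.any_cons, h1, hih.1]
      | false =>
        have h2 : n ∈ path' := by
          rw [h1, Bool.false_or] at hguard
          simpa using hguard.symm
        simp [List.any_cons, h2, hih.1]

theorem pvMain (graph : List (List Int)) (visited0 : List Bool) (v : Int)
    (hg : ∀ row ∈ graph, ∀ n ∈ row, 0 ≤ n ∧ n.toNat < graph.length)
    (hlen0 : graph.length = visited0.length) :
    ∀ fuel (vis : List Bool) (path : List Int) (src count : Int),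
      0 ≤ src → src.toNat < graph.length →
      pvInv visited0 vis graph.length path →
      ((pvAuxA graph v fuel vis src count).1 = pvDfsB graph visited0 v fuel src count path
        ∧ (pvGetB vis src = false → (pvAuxA graph v fuel vis src count).1 = false →
            (pvAuxA graph v fuel vis src count).2 = vis)) := by
  intro fuel
  induction fuel with
  | zero => intro vis path src count _ _ _; exact ⟨rfl, fun _ _ => rfl⟩
  | succ fuel ih =>
    intro vis path src count hs0 hsl hinv
    by_cases hb : count = v
    · simp [pvAuxA, pvDfsB, hb]
    · have hrow : PySem.List.pyGetD graph src [] = graph[src.toNat] :=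
        PySem.List.pyGetD_eq_getElem graph [] hs0 (by omega)
      have hrowmem : graph[src.toNat] ∈ graph := List.getElem_mem _
      have hbnd : ∀ n ∈ PySem.List.pyGetD graph src [], 0 ≤ n ∧ n.toNat < graph.length := by
        rw [hrow]; exact hg _ hrowmem
      -- the invariant after A marks src / B appends src to the path
      have hlvis : src.toNat < vis.length := by rw [hinv.1, ← hlen0]; exact hsl
      have hinv' : pvInv visited0 (PySem.List.pySetD vis src true) graph.length (path ++ [src]) := by
        constructor
        · rw [PySem.List.pySetD_of_nonneg _ _ hs0, List.length_set]; exact hinv.1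
        · intro i hi0 hil
          have hivis : i.toNat < vis.length := by rw [hinv.1, ← hlen0]; exact hil
          rw [pvGetB, PySem.List.pySetD_of_nonneg _ _ hs0,
            PySem.List.pyGetD_eq_getElem _ _ hi0 (by simp only [List.length_set]; omega),
            List.getElem_set]
          by_cases his : i = src
          · subst his
            rw [if_pos rfl]
            have hc : (path ++ [i]).contains i = true := by
              simp
            rw [hc, Bool.or_true]
          · have hne : i.toNat ≠ src.toNat := by omega
            rw [if_neg (fun h => hne h.symm)]
            have hv : vis[i.toNat] = pvGetB vis i :=
              (PySem.List.pyGetD_eq_getElem vis false hi0 (by omega)).symm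
            rw [hv, hinv.2 i hi0 hil]
            have hc : (path ++ [src]).contains i = path.contains i := by
              simp [his]
            rw [hc]
      have hrec : ∀ visX n, 0 ≤ n → n.toNat < graph.length →
          pvInv visited0 visX graph.length (path ++ [src]) →
          ((pvAuxA graph v fuel visX n (count + 1)).1
              = pvDfsB graph visited0 v fuel n (count + 1) (path ++ [src]) ∧
            (pvGetB visX n = false → (pvAuxA graph v fuel visX n (count + 1)).1 = false →
              (pvAuxA graph v fuel visX n (count + 1)).2 = visX)) :=
        fun visX n hn0 hnl hinvX => ih visX (path ++ [src]) n (count + 1) hn0 hnl hinvX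
      have hloop := pvLoopA_spec
        (fun vis' n => pvAuxA graph v fuel vis' n (count + 1))
        (fun n => pvDfsB graph visited0 v fuel n (count + 1) (path ++ [src]))
        visited0 graph.length (path ++ [src]) src hrec
        (PySem.List.pyGetD graph src []) hbnd
        (PySem.List.pySetD vis src true) hinv'
      constructor
      · show (pvAuxA graph v (fuel + 1) vis src count).1 = _
        simp only [pvAuxA, pvDfsB, if_neg hb]
        rw [hloop.1]
        rfl
      · intro hvfree hfalse
        simp only [pvAuxA, if_neg hb] at hfalse ⊢
        rw [hloop.2 hfalse]
        exact pvSet_restore vis src hs0 hlvis hvfree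

-- ===== VERDICT (by name: the statement is the Claim_ definition above) =====
theorem is_path_hamiltonian_spec : Claim_equal_is_path_hamiltonian := by
  unfold Claim_equal_is_path_hamiltonian
  intro graph visited src count v _ hpre
  unfold Spec_is_path_hamiltonian is_path_hamiltonian is_path_hamiltonian_alt
  rcases hpre with hb | ⟨hs0, hsl, hlen, hg⟩
  · show (pvAuxA graph v (visited.length + 1 + 1) visited src count).1
      = pvDfsB graph visited v (visited.length + 1 + 1) src count []
    simp [pvAuxA, pvDfsB, hb]
  · have hinv : pvInv visited visited graph.length [] := by
      refine ⟨rfl, fun i _ _ => ?_⟩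
      simp
    exact (pvMain graph visited v hg hlen (visited.length + 2) visited [] src count
      hs0 hsl hinv).1
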